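-- pv_equiv track=rewrite | github.com/m1sterzer0/JuliaAtcoder | python/abc170_179/abc176_E.py | solve
-- ===== SOURCE A (Python) =====
-- def solve(H,W,M,h,w) :
--     rows = [0 for i in range(H+1)]
--     cols = [0 for i in range(W+1)]
--     s = set()
--     for (hh,ww) in zip(h,w) : s.add((hh,ww)); rows[hh] += 1; cols[ww] += 1
--     br = max(rows); bc = max(cols)
--     ridx = [i for i in range(H+1) if rows[i] == br]
--     cidx = [i for i in range(W+1) if cols[i] == bc]
--     for r in ridx :
--         for c in cidx :
--             if (r,c) not in s : return br + bc
--     return br+bc-1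
-- ===== SOURCE B (Python) =====
-- def solve(H, W, M, h, w):
--     pts = list(zip(h, w))
--     s = set(pts)
--     rows = [0] * (H + 1)
--     cols = [0] * (W + 1)
--     for hh, ww in pts:
--         rows[hh] += 1
--         cols[ww] += 1
--     br = max(rows)
--     bc = max(cols)
--     ridx = [i for i in range(H + 1) if rows[i] == br]
--     cidx = [i for i in range(W + 1) if cols[i] == bc]
--     covered = sum(1 for (r, c) in s if r in ridx and c in cidx)
--     if covered == len(ridx) * len(cidx):
--         return br + bc - 1
--     return br + bc
-- ===== Notes on version B (the rewrite author's own statement) =====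
-- stated objective: alternative
-- what changed: A probes every max-row x max-column candidate pair against the bomb set with an early-exit nested loop; B instead makes one pass over the deduplicated bombs, counting those whose row and column are both extremal, and compares that count with the product len(ridx)*len(cidx).
import Mathlib
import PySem

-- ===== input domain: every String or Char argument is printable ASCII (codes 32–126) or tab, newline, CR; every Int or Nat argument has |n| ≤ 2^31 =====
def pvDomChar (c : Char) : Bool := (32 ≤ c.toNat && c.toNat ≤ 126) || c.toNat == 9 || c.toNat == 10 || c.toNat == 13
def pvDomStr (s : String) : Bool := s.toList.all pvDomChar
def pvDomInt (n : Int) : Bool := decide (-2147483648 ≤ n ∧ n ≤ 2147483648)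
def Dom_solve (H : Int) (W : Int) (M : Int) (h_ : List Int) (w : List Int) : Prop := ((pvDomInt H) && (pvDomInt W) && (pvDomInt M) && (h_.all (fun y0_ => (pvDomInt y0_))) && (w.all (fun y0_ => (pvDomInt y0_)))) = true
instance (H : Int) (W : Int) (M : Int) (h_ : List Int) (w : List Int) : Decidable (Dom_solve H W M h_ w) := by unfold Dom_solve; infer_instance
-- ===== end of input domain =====

-- B replaces A's early-exit nested scan over all max-row × max-column candidate pairs by one pass
-- over the deduplicated bombs (count those with extremal row and column, compare with the product).

-- ===== PORT A =====
-- literal transliteration of A: one fold over zip(h,w) carrying (s, rows, cols), then the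
-- nested early-return loop over ridx × cidx rendered as List.any.
def solve (H : Int) (W : Int) (M : Int) (h_ : List Int) (w : List Int) : Int :=
  let rows0 : List Int := (PySem.List.pyRange 0 (H + 1) 1).map (fun _ => 0)
  let cols0 : List Int := (PySem.List.pyRange 0 (W + 1) 1).map (fun _ => 0)
  let st := (h_.zip w).foldl
    (fun (st : PySem.Set (Int × Int) × List Int × List Int) p =>
      (PySem.Set.add st.1 p,
       PySem.List.pySetD st.2.1 p.1 (PySem.List.pyGetD st.2.1 p.1 0 + 1),
       PySem.List.pySetD st.2.2 p.2 (PySem.List.pyGetD st.2.2 p.2 0 + 1)))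
    (PySem.Set.empty, rows0, cols0)
  let s := st.1
  let rows := st.2.1
  let cols := st.2.2
  let br := (PySem.List.max? rows (fun x => x)).getD 0
  let bc := (PySem.List.max? cols (fun x => x)).getD 0
  -- '[i for i in range(H+1) if rows[i] == br]' rendered as one indexed scan of rows
  -- (rows has exactly H+1 entries): exact, and evaluable in linear time
  let ridx := (rows.zipIdx.filter (fun q => q.1 == br)).map (fun q => (q.2 : Int))
  let cidx := (cols.zipIdx.filter (fun q => q.1 == bc)).map (fun q => (q.2 : Int))
  if ridx.any (fun r => cidx.any (fun c => !(PySem.Set.contains s (r, c)))) then br + bc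
  else br + bc - 1

-- ===== PORT B =====
-- literal transliteration of Source B: s = set(zip(h,w)); separate count folds for rows and cols;
-- covered = number of bombs in s with extremal row and column, compared with |ridx|·|cidx|.
def solve_alt (H : Int) (W : Int) (M : Int) (h_ : List Int) (w : List Int) : Int :=
  let pts := h_.zip w
  let s : PySem.Set (Int × Int) := PySem.Set.ofList pts
  let rows := pts.foldl
    (fun a p => PySem.List.pySetD a p.1 (PySem.List.pyGetD a p.1 0 + 1))
    (List.replicate (H + 1).toNat (0 : Int))
  let cols := pts.foldl
    (fun a p => PySem.List.pySetD a p.2 (PySem.List.pyGetD a p.2 0 + 1))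
    (List.replicate (W + 1).toNat (0 : Int))
  let br := (PySem.List.max? rows (fun x => x)).getD 0
  let bc := (PySem.List.max? cols (fun x => x)).getD 0
  -- '[i for i in range(H+1) if rows[i] == br]' rendered as one indexed scan of rows: exact, linear time
  let ridx := (rows.zipIdx.filter (fun q => q.1 == br)).map (fun q => (q.2 : Int))
  let cidx := (cols.zipIdx.filter (fun q => q.1 == bc)).map (fun q => (q.2 : Int))
  let covered := (s.filter (fun p => ridx.contains p.1 && cidx.contains p.2)).length
  if covered = ridx.length * cidx.length then br + bc - 1 else br + bc

-- ===== PRECONDITION & SPEC =====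
-- Pre_ excludes exactly the inputs on which the Python A raises: H < 0 or W < 0 (empty rows/cols:
-- IndexError/ValueError on max), or a bomb coordinate outside Python's index range (IndexError).
def Pre_solve (H : Int) (W : Int) (M : Int) (h_ : List Int) (w : List Int) : Prop :=
  0 ≤ H ∧ 0 ≤ W ∧
  ∀ p ∈ h_.zip w, -(H + 1) ≤ p.1 ∧ p.1 ≤ H ∧ -(W + 1) ≤ p.2 ∧ p.2 ≤ W
instance (H : Int) (W : Int) (M : Int) (h_ : List Int) (w : List Int) : Decidable (Pre_solve H W M h_ w) := by unfold Pre_solve; infer_instance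

def pvWitness_solve : Int × Int × Int × List Int × List Int := (2, 3, 3, [1, 1, 2], [0, 3, 0])

def Spec_solve (H : Int) (W : Int) (M : Int) (h_ : List Int) (w : List Int) (out : Int) : Prop := out = solve_alt H W M h_ w
instance (H : Int) (W : Int) (M : Int) (h_ : List Int) (w : List Int) (out : Int) : Decidable (Spec_solve H W M h_ w out) := by unfold Spec_solve; infer_instance

-- ===== CLAIM (what is proved, stated in full; the proofs are below) =====
def Claim_equal_solve : Prop := ∀ (H : Int) (W : Int) (M : Int) (h_ : List Int) (w : List Int), Dom_solve H W M h_ w → Pre_solve H W M h_ w → Spec_solve H W M h_ w (solve H W M h_ w)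

-- ===== LEMMAS AND PROOFS =====

-- the first component of A's triple fold is exactly PySem.Set.ofList of the zipped points
theorem foldA_fst (l : List (Int × Int)) (init : PySem.Set (Int × Int) × List Int × List Int) :
    (l.foldl
      (fun (st : PySem.Set (Int × Int) × List Int × List Int) p =>
        (PySem.Set.add st.1 p,
         PySem.List.pySetD st.2.1 p.1 (PySem.List.pyGetD st.2.1 p.1 0 + 1),
         PySem.List.pySetD st.2.2 p.2 (PySem.List.pyGetD st.2.2 p.2 0 + 1))) init).1
    = l.foldl (fun s p => PySem.Set.add s p) init.1 := by
  induction l generalizing init with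
  | nil => rfl
  | cons x xs ih => simp [List.foldl, ih]

theorem foldA_snd (l : List (Int × Int)) (init : PySem.Set (Int × Int) × List Int × List Int) :
    (l.foldl
      (fun (st : PySem.Set (Int × Int) × List Int × List Int) p =>
        (PySem.Set.add st.1 p,
         PySem.List.pySetD st.2.1 p.1 (PySem.List.pyGetD st.2.1 p.1 0 + 1),
         PySem.List.pySetD st.2.2 p.2 (PySem.List.pyGetD st.2.2 p.2 0 + 1))) init).2.1
    = l.foldl (fun a p => PySem.List.pySetD a p.1 (PySem.List.pyGetD a p.1 0 + 1)) init.2.1 := by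
  induction l generalizing init with
  | nil => rfl
  | cons x xs ih => simp [List.foldl, ih]

theorem foldA_thd (l : List (Int × Int)) (init : PySem.Set (Int × Int) × List Int × List Int) :
    (l.foldl
      (fun (st : PySem.Set (Int × Int) × List Int × List Int) p =>
        (PySem.Set.add st.1 p,
         PySem.List.pySetD st.2.1 p.1 (PySem.List.pyGetD st.2.1 p.1 0 + 1),
         PySem.List.pySetD st.2.2 p.2 (PySem.List.pyGetD st.2.2 p.2 0 + 1))) init).2.2
    = l.foldl (fun a p => PySem.List.pySetD a p.2 (PySem.List.pyGetD a p.2 0 + 1)) init.2.2 := by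
  induction l generalizing init with
  | nil => rfl
  | cons x xs ih => simp [List.foldl, ih]

-- the index list of an indexed filtered scan has no duplicates
theorem nodup_idxScan (xs : List Int) (p : Int × Nat → Bool) :
    ((xs.zipIdx.filter p).map (fun q => ((q.2 : Nat) : Int))).Nodup := by
  have h2 : ((xs.zipIdx.filter p).map (fun q => q.2)).Sublist (xs.zipIdx.map (fun q => q.2)) :=
    List.Sublist.map _ (List.filter_sublist (l := xs.zipIdx))
  have h4 : ((xs.zipIdx.filter p).map (fun q => q.2)).Nodup :=
    (List.nodup_zipIdx_map_snd xs).sublist h2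
  have h6 : Function.Injective (fun n : Nat => (n : Int)) := fun a b hab => by simpa using hab
  simpa [List.map_map, Function.comp] using h4.map h6

-- counting lemma: for duplicate-free lists, the number of pairs of s inside rl × cl equals
-- |rl|·|cl| exactly when every pair of rl × cl lies in s
theorem count_eq_prod_iff (s : List (Int × Int)) (rl cl : List Int)
    (hs : s.Nodup) (hr : rl.Nodup) (hc : cl.Nodup) :
    (s.filter (fun p => p.1 ∈ rl ∧ p.2 ∈ cl)).length = rl.length * cl.length ↔
    ∀ r ∈ rl, ∀ c ∈ cl, (r, c) ∈ s := by
  classical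
  have hP : (rl ×ˢ cl).Nodup := hr.product hc
  have hmem : ∀ p : Int × Int, (p.1 ∈ rl ∧ p.2 ∈ cl) ↔ p ∈ rl ×ˢ cl := by
    intro p
    rw [List.mem_product]
  have hfe : s.filter (fun p => p.1 ∈ rl ∧ p.2 ∈ cl) = s.filter (fun p => p ∈ rl ×ˢ cl) := by
    apply List.filter_congr
    intro p _
    simp [hmem p]
  rw [hfe]
  have h1 : (s.filter (fun p => p ∈ rl ×ˢ cl)).length
      = (s.toFinset ∩ (rl ×ˢ cl).toFinset).card := by
    rw [← List.toFinset_card_of_nodup (hs.filter _), List.toFinset_filter]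
    congr 1
    rw [← Finset.filter_mem_eq_inter]
    apply Finset.filter_congr
    intro p _
    simp
  have h2 : rl.length * cl.length = (rl ×ˢ cl).toFinset.card := by
    rw [List.toFinset_card_of_nodup hP, List.length_product]
  rw [h1, h2]
  constructor
  · intro hcard r hrr c hcc
    have hsub : (rl ×ˢ cl).toFinset ⊆ s.toFinset := by
      rw [← Finset.inter_eq_right]
      apply Finset.eq_of_subset_of_card_le Finset.inter_subset_right
      omega
    have : (r, c) ∈ (rl ×ˢ cl).toFinset := by
      rw [List.mem_toFinset, List.mem_product]; exact ⟨hrr, hcc⟩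
    have := hsub this
    rwa [List.mem_toFinset] at this
  · intro hall
    have hsub : (rl ×ˢ cl).toFinset ⊆ s.toFinset := by
      intro p hp
      rw [List.mem_toFinset, List.mem_product] at hp
      rw [List.mem_toFinset]
      have := hall p.1 hp.1 p.2 hp.2
      simpa using this
    rw [Finset.inter_eq_right.mpr hsub]

-- the two final decisions agree for any duplicate-free s, rl, cl
theorem decision_eq (s : List (Int × Int)) (rl cl : List Int) (br bc : Int)
    (hs : s.Nodup) (hr : rl.Nodup) (hc : cl.Nodup) :
    (if rl.any (fun r => cl.any (fun c => !(PySem.Set.contains s (r, c)))) then br + bc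
     else br + bc - 1)
    = (if (s.filter (fun p => rl.contains p.1 && cl.contains p.2)).length
         = rl.length * cl.length then br + bc - 1 else br + bc) := by
  have hfe : s.filter (fun p => rl.contains p.1 && cl.contains p.2)
      = s.filter (fun p => p.1 ∈ rl ∧ p.2 ∈ cl) := by
    apply List.filter_congr
    intro p _
    simp
  rw [hfe]
  have hcond : (rl.any (fun r => cl.any (fun c => !(PySem.Set.contains s (r, c)))) = true)
      ↔ ∃ r ∈ rl, ∃ c ∈ cl, (r, c) ∉ s := by
    simp [List.any_eq_true]
  by_cases hall : ∀ r ∈ rl, ∀ c ∈ cl, (r, c) ∈ s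
  · rw [if_neg (fun hx => by
        obtain ⟨r, hrr, c, hcc, hns⟩ := hcond.mp hx
        exact hns (hall r hrr c hcc)),
      if_pos ((count_eq_prod_iff s rl cl hs hr hc).mpr hall)]
  · rw [if_pos (hcond.mpr (by
        push Not at hall
        obtain ⟨r, hrr, c, hcc, hns⟩ := hall
        exact ⟨r, hrr, c, hcc, hns⟩)),
      if_neg (fun hcnt => hall ((count_eq_prod_iff s rl cl hs hr hc).mp hcnt))]

-- ===== VERDICT (by name: the statement is the Claim_ definition above) =====
theorem solve_spec : Claim_equal_solve := by
  intro H W M h_ w _ _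
  unfold Spec_solve solve solve_alt
  have hrep : ∀ n : Int, (PySem.List.pyRange 0 (n + 1) 1).map (fun _ => (0 : Int))
      = List.replicate (n + 1).toNat 0 := by
    intro n
    rw [List.map_const', PySem.List.length_pyRange_one]
    norm_num
  have hset : ∀ l : List (Int × Int),
      l.foldl (fun s p => PySem.Set.add s p) PySem.Set.empty = PySem.Set.ofList l := by
    intro l
    rfl
  simp only [foldA_fst, foldA_snd, foldA_thd, hrep, hset]
  exact decision_eq _ _ _ _ _ (PySem.Set.nodup_ofList _) (nodup_idxScan _ _) (nodup_idxScan _ _)
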